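-- pv_equiv track=rewrite | github.com/xing24xing/MyMathModule | math_module_package/mymath.py | alternate_primes
-- ===== SOURCE A (Python) =====
-- def is_prime(n):
--     if n <= 1:
--         return False
--     for i in range(2, int(n**0.5) + 1):
--         if n % i == 0:
--             return False
--     return True
--
-- def alternate_primes(n):
--     primes = []
--     num, count = 2, 0
--     while count < n:
--         if is_prime(num):
--             if count % 2 == 0:
--                 primes.append(num)
--             count += 1
--         num += 1
--     return primes
-- ===== SOURCE B (Python) =====
-- def alternate_primes(n):
--     if n <= 0:
--         return []
--     primes = [2]
--     cand = 3
--     while len(primes) < n: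
--         is_p = True
--         for p in primes:
--             if p * p > cand:
--                 break
--             if cand % p == 0:
--                 is_p = False
--                 break
--         if is_p:
--             primes.append(cand)
--         cand += 2
--     return primes[::2]
-- ===== Notes on version B (the rewrite author's own statement) =====
-- stated objective: faster
-- what changed: B keeps the list of primes found so far and trial-divides each odd candidate only by those primes up to its square root (instead of testing every integer divisor up to sqrt for every number), then returns the even-indexed primes by slicing the finished list instead of interleaving a parity counter.
import Mathlib
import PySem

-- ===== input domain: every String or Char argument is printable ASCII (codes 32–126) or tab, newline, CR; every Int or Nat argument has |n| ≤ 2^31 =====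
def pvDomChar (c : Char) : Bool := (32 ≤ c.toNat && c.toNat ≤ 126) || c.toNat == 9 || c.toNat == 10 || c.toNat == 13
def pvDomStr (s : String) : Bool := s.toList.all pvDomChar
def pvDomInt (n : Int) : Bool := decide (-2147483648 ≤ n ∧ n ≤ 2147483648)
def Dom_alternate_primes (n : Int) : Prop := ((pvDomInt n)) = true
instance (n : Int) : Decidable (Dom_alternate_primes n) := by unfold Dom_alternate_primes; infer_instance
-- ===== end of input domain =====

-- B replaces A's per-number trial division by every integer up to sqrt with trial division of odd
-- candidates by the primes found so far, and slices the finished list instead of counting parity.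
-- (objective: faster — measured constant-factor speed-up)

-- ===== PORT A =====

-- least prime ≥ m, minus m: termination measure for the while-loops (both ports advance
-- through candidates until the next prime is met; Nat.exists_infinite_primes bounds the search)
def pgap (m : ℕ) : ℕ := Nat.find (Nat.exists_infinite_primes m) - m

lemma pgap_lt {m : ℕ} (h : ¬ Nat.Prime m) : pgap (m + 1) < pgap m := by
  have h1 := Nat.find_spec (Nat.exists_infinite_primes m)
  have h2 : Nat.find (Nat.exists_infinite_primes (m + 1)) ≤
      Nat.find (Nat.exists_infinite_primes m) := by
    apply Nat.find_le
    refine ⟨?_, h1.2⟩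
    rcases Nat.lt_or_ge m (Nat.find (Nat.exists_infinite_primes m)) with hlt | hge
    · omega
    · exact absurd (Nat.le_antisymm hge h1.1 ▸ h1.2) h
  have h3 : m + 1 ≤ Nat.find (Nat.exists_infinite_primes m) := by
    rcases Nat.lt_or_ge m (Nat.find (Nat.exists_infinite_primes m)) with hlt | hge
    · omega
    · exact absurd (Nat.le_antisymm hge h1.1 ▸ h1.2) h
  have h4 := Nat.find_spec (Nat.exists_infinite_primes (m + 1))
  unfold pgap
  omega

-- the 'for i in range(2, int(n**0.5)+1): if n % i == 0: return False' loop of is_prime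
def aTrial (n : Int) : List Int → Bool
  | [] => true
  | i :: is => if PySem.Int.mod n i == 0 then false else aTrial n is

-- int(n**0.5) is ported as Int.sqrt: exact here, because the float sqrt of an int of this size
-- errs by at most +1 near perfect squares, and one extra trial divisor above the true sqrt
-- never changes is_prime's result.
def is_prime (n : Int) : Bool :=
  if n ≤ 1 then false
  else aTrial n (PySem.List.pyRange 2 (Int.sqrt n + 1) 1)

lemma aTrial_eq_true_iff (n : Int) (l : List Int) :
    aTrial n l = true ↔ ∀ i ∈ l, ¬ (PySem.Int.mod n i = 0) := by
  induction l with
  | nil => simp [aTrial]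
  | cons i is ih =>
    by_cases h : PySem.Int.mod n i = 0 <;> simp [aTrial, h, ih]

-- A's is_prime agrees with primality (needed already for the loop's termination)
lemma is_prime_iff (m : ℕ) : is_prime (m : Int) = true ↔ Nat.Prime m := by
  by_cases hm : m ≤ 1
  · interval_cases m <;> simp [is_prime] <;> decide
  · have h2 : 2 ≤ m := by omega
    have hle : ¬ ((m : Int) ≤ 1) := by exact_mod_cast hm
    rw [is_prime, if_neg hle, aTrial_eq_true_iff, Nat.prime_def_le_sqrt]
    constructor
    · intro h
      refine ⟨h2, fun j hj2 hjs hdvd => ?_⟩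
      refine h (j : Int) ?_ ?_
      · rw [PySem.List.mem_pyRange_one]
        constructor
        · exact_mod_cast hj2
        · rw [Int.sqrt_natCast]
          have : (j : Int) ≤ (Nat.sqrt m : Int) := by exact_mod_cast hjs
          omega
      · rw [PySem.Int.mod_eq_zero_iff_dvd]
        exact_mod_cast hdvd
    · rintro ⟨-, h⟩ i hi hmod
      rw [PySem.List.mem_pyRange_one] at hi
      rw [Int.sqrt_natCast] at hi
      lift i to ℕ using (by omega) with j
      refine h j (by exact_mod_cast hi.1) (by omega) ?_
      rw [PySem.Int.mod_eq_zero_iff_dvd] at hmod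
      exact_mod_cast hmod

lemma not_prime_of_is_prime_false {m : ℕ} (h : ¬ is_prime (m : Int) = true) : ¬ Nat.Prime m :=
  fun hp => h ((is_prime_iff m).mpr hp)

-- the main while-loop of A: state (primes, num, count) exactly as in the Python
def aLoop (n : Int) (primes : List Int) (num : ℕ) (count : Int) : List Int :=
  if hc : count < n then
    if hp : is_prime (num : Int) then
      aLoop n (if PySem.Int.mod count 2 == 0 then primes ++ [(num : Int)] else primes)
        (num + 1) (count + 1)
    else
      aLoop n primes (num + 1) count
  else primes
termination_by ((n - count).toNat, pgap num)
decreasing_by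
  · exact Prod.Lex.left _ _ (by omega)
  · exact Prod.Lex.right _ (pgap_lt (not_prime_of_is_prime_false hp))

def alternate_primes (n : Int) : List Int := aLoop n [] 2 0

-- ===== PORT B =====

-- the 'for p in primes: …' loop with its two breaks
def bTest (cand : Int) : List Int → Bool
  | [] => true
  | p :: ps =>
    if cand < p * p then true
    else if PySem.Int.mod cand p == 0 then false
    else bTest cand ps

-- all primes below c, in increasing order (the value of B's `primes` list, carried as an invariant)
def primesBelowL (c : ℕ) : List ℕ := (List.range c).filter (fun m => decide (Nat.Prime m))

lemma mem_primesBelowL {p c : ℕ} : p ∈ primesBelowL c ↔ p < c ∧ Nat.Prime p := by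
  simp [primesBelowL, List.mem_filter, List.mem_range]

lemma pairwise_primesBelowL (c : ℕ) : List.Pairwise (· < ·) (primesBelowL c) :=
  List.Pairwise.filter _ List.pairwise_lt_range

lemma primesBelowL_succ (c : ℕ) :
    primesBelowL (c + 1) = primesBelowL c ++ if Nat.Prime c then [c] else [] := by
  by_cases h : Nat.Prime c <;>
    simp [primesBelowL, List.range_succ, List.filter_append, h]

lemma not_prime_of_even {k : ℕ} (h2 : k % 2 = 0) (h3 : 3 ≤ k) : ¬ Nat.Prime k := by
  intro hp
  have hdvd : 2 ∣ k := Nat.dvd_of_mod_eq_zero h2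
  rcases (Nat.Prime.eq_one_or_self_of_dvd hp 2 hdvd) with h | h <;> omega

lemma bTest_sorted (c : ℕ) (l : List ℕ) (hpos : ∀ p ∈ l, 0 < p)
    (hsort : List.Pairwise (· < ·) l) :
    bTest (c : Int) (l.map (fun m : ℕ => (m : Int))) = true ↔
      ∀ p ∈ l, p * p ≤ c → ¬ p ∣ c := by
  induction l with
  | nil => simp [bTest]
  | cons p t ih =>
    rcases List.pairwise_cons.mp hsort with ⟨hlt, htail⟩
    by_cases hsq : c < p * p
    · have hsq' : (c : Int) < (p : Int) * (p : Int) := by exact_mod_cast hsq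
      simp only [List.map_cons, bTest, if_pos hsq']
      constructor
      · intro _ q hq hqq
        rcases List.mem_cons.mp hq with rfl | hq
        · exact absurd hqq (by omega)
        · have := hlt q hq
          exact absurd hqq (by nlinarith)
      · intro _; trivial
    · have hsq' : ¬ ((c : Int) < (p : Int) * (p : Int)) := by
        omega
      simp only [List.map_cons, bTest, if_neg hsq']
      by_cases hd : p ∣ c
      · have hmod : PySem.Int.mod (c : Int) (p : Int) = 0 := by
          rw [PySem.Int.mod_eq_zero_iff_dvd]; exact_mod_cast hd
        simp only [hmod, beq_self_eq_true, if_true, Bool.false_eq_true, false_iff]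
        intro h
        exact (h p List.mem_cons_self (by omega)) hd
      · have hb : (PySem.Int.mod (c : Int) (p : Int) == 0) = false := by
          rw [beq_eq_false_iff_ne]
          rw [Ne, PySem.Int.mod_eq_zero_iff_dvd]
          intro h; exact hd (by exact_mod_cast h)
        simp only [hb, Bool.false_eq_true, if_false]
        rw [ih (fun q hq => hpos q (List.mem_cons_of_mem _ hq)) htail]
        constructor
        · intro h q hq hqq
          rcases List.mem_cons.mp hq with rfl | hq
          · exact hd
          · exact h q hq hqq
        · intro h q hq hqq
          exact h q (List.mem_cons_of_mem _ hq) hqq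

-- B's inner loop, run against the invariant list, decides primality
lemma bTest_primesBelowL {c : ℕ} (h2 : 2 ≤ c) :
    bTest (c : Int) ((primesBelowL c).map (fun m : ℕ => (m : Int))) = true ↔ Nat.Prime c := by
  rw [bTest_sorted c _ (fun p hp => (mem_primesBelowL.mp hp).2.pos) (pairwise_primesBelowL c)]
  constructor
  · intro h
    by_contra hnp
    have hm := Nat.minFac_dvd c
    have hmp : Nat.Prime (Nat.minFac c) := Nat.minFac_prime (by omega)
    have hsq : Nat.minFac c ^ 2 ≤ c := Nat.minFac_sq_le_self (by omega) hnp
    have hlt : Nat.minFac c < c := by nlinarith [hmp.two_le]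
    exact h (Nat.minFac c) (mem_primesBelowL.mpr ⟨hlt, hmp⟩) (by nlinarith) hm
  · intro hc p hp hpp hdvd
    rcases mem_primesBelowL.mp hp with ⟨hlt, hpprime⟩
    rcases (Nat.Prime.eq_one_or_self_of_dvd hc p hdvd) with h | h
    · exact absurd h hpprime.ne_one
    · omega

lemma prime_of_bTest {c : ℕ} (h3 : 3 ≤ c)
    (h : bTest (c : Int) ((primesBelowL c).map (fun m : ℕ => (m : Int))) = true) : Nat.Prime c :=
  (bTest_primesBelowL (by omega)).mp h

lemma not_prime_of_bTest_false {c : ℕ} (h3 : 3 ≤ c)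
    (h : ¬ bTest (c : Int) ((primesBelowL c).map (fun m : ℕ => (m : Int))) = true) : ¬ Nat.Prime c :=
  fun hp => h ((bTest_primesBelowL (by omega)).mpr hp)

-- invariant update: appending a found prime, stepping cand by 2 (cand odd, so cand+1 is never prime)
lemma primesBelowL_step_prime {c : ℕ} (hodd : c % 2 = 1) (h3 : 3 ≤ c) (hp : Nat.Prime c) :
    primesBelowL (c + 2) = primesBelowL c ++ [c] := by
  have : ¬ Nat.Prime (c + 1) := not_prime_of_even (by omega) (by omega)
  rw [show c + 2 = (c + 1) + 1 by ring, primesBelowL_succ, primesBelowL_succ,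
    if_neg this, if_pos hp]
  simp

lemma primesBelowL_step_not_prime {c : ℕ} (hodd : c % 2 = 1) (h3 : 3 ≤ c)
    (hp : ¬ Nat.Prime c) : primesBelowL (c + 2) = primesBelowL c := by
  have : ¬ Nat.Prime (c + 1) := not_prime_of_even (by omega) (by omega)
  rw [show c + 2 = (c + 1) + 1 by ring, primesBelowL_succ, primesBelowL_succ,
    if_neg this, if_neg hp]
  simp

-- the main while-loop of B: state (primes, cand); the Prop arguments record the reachable-state
-- invariant (primes = all primes below cand; cand odd and ≥ 3) and are needed only for termination
def bLoop (n : Int) (primes : List Int) (cand : ℕ)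
    (hinv : primes = (primesBelowL cand).map (fun m : ℕ => (m : Int)))
    (hodd : cand % 2 = 1) (h3 : 3 ≤ cand) : List Int :=
  if hlen : (primes.length : Int) < n then
    if ht : bTest (cand : Int) primes then
      bLoop n (primes ++ [(cand : Int)]) (cand + 2)
        (by rw [hinv, primesBelowL_step_prime hodd h3 (prime_of_bTest h3 (hinv ▸ ht))]; simp)
        (by omega) (by omega)
    else
      bLoop n primes (cand + 2)
        (by rw [hinv, primesBelowL_step_not_prime hodd h3 (not_prime_of_bTest_false h3 (hinv ▸ ht))])
        (by omega) (by omega)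
  else primes
termination_by ((n - primes.length).toNat, pgap cand)
decreasing_by
  · exact Prod.Lex.left _ _ (by simp; omega)
  · have h1 : ¬ Nat.Prime cand := not_prime_of_bTest_false h3 (hinv ▸ ht)
    have h2 : ¬ Nat.Prime (cand + 1) := not_prime_of_even (by omega) (by omega)
    exact Prod.Lex.right _ (lt_trans (pgap_lt h2) (pgap_lt h1))

def alternate_primes_alt (n : Int) : List Int :=
  if n ≤ 0 then []
  else
    match PySem.List.slice?
        (bLoop n [(2 : Int)] 3 (by decide) (by decide) (by decide)) none none 2 with
    | some r => r
    | none => []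

-- ===== PRECONDITION & SPEC =====
def Spec_alternate_primes (n : Int) (out : List Int) : Prop := out = alternate_primes_alt n
instance (n : Int) (out : List Int) : Decidable (Spec_alternate_primes n out) := by unfold Spec_alternate_primes; infer_instance

-- ===== CLAIM (what is proved, stated in full; the proofs are below) =====
def Claim_equal_alternate_primes : Prop := ∀ (n : Int), Dom_alternate_primes n → Spec_alternate_primes n (alternate_primes n)

-- ===== LEMMAS AND PROOFS =====

-- the stream of the next k primes from num upwards: both loops produce segments of it
def nextPrimes (k : ℕ) (num : ℕ) : List ℕ :=
  if k = 0 then []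
  else if hp : Nat.Prime num then num :: nextPrimes (k - 1) (num + 1)
  else nextPrimes k (num + 1)
termination_by (k, pgap num)
decreasing_by
  · exact Prod.Lex.left _ _ (by omega)
  · exact Prod.Lex.right _ (pgap_lt hp)

lemma nextPrimes_zero (num : ℕ) : nextPrimes 0 num = [] := by
  rw [nextPrimes]; simp

lemma nextPrimes_prime {num : ℕ} (k : ℕ) (hp : Nat.Prime num) :
    nextPrimes (k + 1) num = num :: nextPrimes k (num + 1) := by
  rw [nextPrimes]; simp [hp]

lemma nextPrimes_not_prime {num : ℕ} (k : ℕ) (hp : ¬ Nat.Prime num) :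
    nextPrimes k num = nextPrimes k (num + 1) := by
  by_cases hk : k = 0
  · subst hk; rw [nextPrimes_zero, nextPrimes_zero]
  · rw [nextPrimes]; simp [hk, hp]

-- every other element, starting with (take = true) or after (take = false) the head
def altSel {α : Type} : Bool → List α → List α
  | _, [] => []
  | true, x :: xs => x :: altSel false xs
  | false, _ :: xs => altSel true xs

lemma altSel_nil {α : Type} (b : Bool) : altSel b ([] : List α) = [] := by
  cases b <;> rfl

lemma parity_flip (count : Int) :
    (PySem.Int.mod (count + 1) 2 == 0) = !(PySem.Int.mod count 2 == 0) := by
  have h1 := PySem.Int.mod_two_eq count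
  have h2 := PySem.Int.mod_two_eq (count + 1)
  have h3 := PySem.Int.floordiv_mul_add_mod count 2
  have h4 := PySem.Int.floordiv_mul_add_mod (count + 1) 2
  rcases h1 with h1 | h1 <;> rcases h2 with h2 | h2 <;> rw [h1, h2] <;>
    first
      | decide
      | (exfalso; omega)

-- A's loop produces: accumulator ++ every-other of the next (n - count) primes
lemma aLoop_eq (n : Int) (primes : List Int) (num : ℕ) (count : Int) :
    aLoop n primes num count =
      primes ++ altSel (PySem.Int.mod count 2 == 0)
        ((nextPrimes (n - count).toNat num).map (fun m : ℕ => (m : Int))) := by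
  induction primes, num, count using aLoop.induct n with
  | case1 primes num count hc hp ih =>
    rw [aLoop, dif_pos hc, dif_pos hp]
    have hprime : Nat.Prime num := (is_prime_iff num).mp hp
    have hk : (n - count).toNat = (n - (count + 1)).toNat + 1 := by omega
    simp only [dite_eq_ite] at ih
    rw [hk, nextPrimes_prime _ hprime, ih, parity_flip]
    cases hb : (PySem.Int.mod count 2 == 0) with
    | true => simp [altSel]
    | false => simp [altSel]
  | case2 primes num count hc hp ih =>
    rw [aLoop, dif_pos hc, dif_neg hp, ih,
      nextPrimes_not_prime _ (not_prime_of_is_prime_false hp)]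
  | case3 primes num count hc =>
    rw [aLoop, dif_neg hc]
    have hk : (n - count).toNat = 0 := by omega
    rw [hk, nextPrimes_zero]
    simp [altSel_nil]

-- B's loop produces: accumulator ++ all of the next (n - len) primes
lemma bLoop_eq (n : Int) (primes : List Int) (cand : ℕ) (hinv) (hodd) (h3) :
    bLoop n primes cand hinv hodd h3 =
      primes ++ (nextPrimes (n - primes.length).toNat cand).map (fun m : ℕ => (m : Int)) := by
  induction primes, cand, hinv, hodd, h3 using bLoop.induct n with
  | case1 cand hodd h3 hlen ht ih =>
    rw [bLoop, dif_pos hlen, dif_pos ht, ih]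
    have hprime : Nat.Prime cand := prime_of_bTest h3 ht
    have hnp1 : ¬ Nat.Prime (cand + 1) := not_prime_of_even (by omega) (by omega)
    have hk : (n - (List.map (fun m : ℕ => (m : Int)) (primesBelowL cand)).length).toNat =
        (n - ((List.map (fun m : ℕ => (m : Int)) (primesBelowL cand)).length + 1)).toNat + 1 := by
      simp only [List.length_map] at hlen ⊢
      omega
    rw [hk, nextPrimes_prime _ hprime, nextPrimes_not_prime _ hnp1]
    simp
  | case2 cand hodd h3 hlen ht ih =>
    rw [bLoop, dif_pos hlen, dif_neg ht, ih]
    have hnp : ¬ Nat.Prime cand := not_prime_of_bTest_false h3 ht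
    have hnp1 : ¬ Nat.Prime (cand + 1) := not_prime_of_even (by omega) (by omega)
    rw [nextPrimes_not_prime _ hnp, nextPrimes_not_prime _ hnp1]
  | case3 cand hodd h3 hlen =>
    rw [bLoop, dif_neg hlen]
    have hk : (n - (List.map (fun m : ℕ => (m : Int)) (primesBelowL cand)).length).toNat = 0 := by
      omega
    rw [hk, nextPrimes_zero]
    simp

-- every other element of xs, by index, is altSel true xs
lemma filterMap_double_idx : ∀ (xs : List Int),
    (List.range ((xs.length + 1) / 2)).filterMap (fun k => xs[2 * k]?) = altSel true xs
  | [] => by simp [altSel]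
  | [x] => by simp [altSel, List.range_succ]
  | x :: y :: l => by
    have ih := filterMap_double_idx l
    have hlen : (x :: y :: l).length = l.length + 2 := by simp
    have hk : ((x :: y :: l).length + 1) / 2 = (l.length + 1) / 2 + 1 := by
      rw [hlen]; omega
    rw [hk, List.range_succ_eq_map, List.filterMap_cons, List.filterMap_map]
    have h0 : (x :: y :: l)[2 * 0]? = some x := rfl
    rw [h0]
    have hf : ((fun k => (x :: y :: l)[2 * k]?) ∘ Nat.succ) = fun k => l[2 * k]? := by
      funext k
      have : 2 * Nat.succ k = 2 * k + 1 + 1 := by omega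
      simp [this]
    rw [hf, ih]
    rfl

-- xs[::2] is altSel true
lemma slice_two_eq_altSel (xs : List Int) :
    PySem.List.slice? xs none none 2 = some (altSel true xs) := by
  rw [PySem.List.slice?, PySem.List.sliceIndices]
  norm_num
  have hcnt : (if 0 < xs.length then
      (((xs.length : Int) + 2 - 1) / 2).toNat else 0) = (xs.length + 1) / 2 := by
    split_ifs with h <;> omega
  rw [hcnt]
  have hfun : (fun k : ℕ => xs[(2 * (k : Int)).toNat]?) =
      fun k : ℕ => xs[2 * k]? := by
    funext k
    have h2k : (2 * (k : Int)).toNat = 2 * k := by omega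
    rw [h2k]
  rw [hfun, filterMap_double_idx]

-- ===== VERDICT (by name: the statement is the Claim_ definition above) =====
theorem alternate_primes_spec : Claim_equal_alternate_primes := by
  intro n _
  unfold Spec_alternate_primes alternate_primes alternate_primes_alt
  rw [aLoop_eq]
  have hmod0 : (PySem.Int.mod 0 2 == 0) = true := by decide
  rw [hmod0]
  by_cases hn : n ≤ 0
  · rw [if_pos hn]
    have hk : (n - 0).toNat = 0 := by omega
    rw [hk, nextPrimes_zero]
    simp [altSel_nil]
  · rw [if_neg hn, bLoop_eq, slice_two_eq_altSel]
    have hk : (n - 0).toNat = (n - ([(2 : Int)].length : Int)).toNat + 1 := by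
      simp; omega
    rw [hk, nextPrimes_prime _ Nat.prime_two]
    simp [altSel]
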